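-- pv_equiv track=rewrite | github.com/Sarkoxed/Crypto-Library | tools/other/combinatorics/partitions/num_of_partitions_euler.py | ypat2
-- ===== SOURCE A (Python) =====
-- def ypat2(n):
--     l = [1]
--     for i in range(1, n + 1):
--         if i % 2 != 0:
--             l.append(l[i - 1] + (i + 1) // 2)
--         else:
--             l.append(l[i - 1] + i + 1)
--     return l
-- ===== SOURCE B (Python) =====
-- def ypat2(n):
--     # closed form: with M=(i+1)//2, K=i//2, l[i] = 1 + M*(M+1)//2 + K*(K+2)
--     return [1] + [1 + ((i + 1) // 2) * ((i + 1) // 2 + 1) // 2 + (i // 2) * (i // 2 + 2)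
--                   for i in range(1, n + 1)]
-- ===== Notes on version B (the rewrite author's own statement) =====
-- stated objective: simpler
-- what changed: Replaces the sequential parity-dependent recurrence with an accumulator list by a direct closed-form expression per index, built in one comprehension with no dependence between entries.
import Mathlib
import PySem

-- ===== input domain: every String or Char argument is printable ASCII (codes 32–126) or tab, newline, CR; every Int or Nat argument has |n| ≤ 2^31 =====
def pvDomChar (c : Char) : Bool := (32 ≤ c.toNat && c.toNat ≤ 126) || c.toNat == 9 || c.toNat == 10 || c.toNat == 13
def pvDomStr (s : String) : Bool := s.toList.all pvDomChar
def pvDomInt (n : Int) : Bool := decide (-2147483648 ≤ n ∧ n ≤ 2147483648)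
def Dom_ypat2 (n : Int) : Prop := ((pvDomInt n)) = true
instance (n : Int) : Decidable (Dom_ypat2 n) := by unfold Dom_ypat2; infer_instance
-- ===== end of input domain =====

-- B replaces A's sequential parity-dependent recurrence by a per-index closed form (simpler, no accumulator).


-- ===== PORT A =====
-- l[i-1] is always in range when the loop reads it, so the getD default 0 is never used (proved below)
def ypat2 (n : Int) : List Int :=
  (PySem.List.pyRange 1 (n + 1) 1).foldl
    (fun l i =>
      if PySem.Int.mod i 2 ≠ 0 then
        l ++ [(PySem.List.pyGet? l (i - 1)).getD 0 + PySem.Int.floordiv (i + 1) 2]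
      else
        l ++ [(PySem.List.pyGet? l (i - 1)).getD 0 + i + 1])
    [1]

-- ===== PORT B =====
def ypat2_alt (n : Int) : List Int :=
  1 :: (PySem.List.pyRange 1 (n + 1) 1).map (fun i =>
    1 + PySem.Int.floordiv (PySem.Int.floordiv (i + 1) 2 * (PySem.Int.floordiv (i + 1) 2 + 1)) 2
      + PySem.Int.floordiv i 2 * (PySem.Int.floordiv i 2 + 2))

-- ===== PRECONDITION & SPEC =====
def Spec_ypat2 (n : Int) (out : List Int) : Prop := out = ypat2_alt n
instance (n : Int) (out : List Int) : Decidable (Spec_ypat2 n out) := by unfold Spec_ypat2; infer_instance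

-- ===== CLAIM (what is proved, stated in full; the proofs are below) =====
def Claim_equal_ypat2 : Prop := ∀ (n : Int), Dom_ypat2 n → Spec_ypat2 n (ypat2 n)

-- ===== LEMMAS AND PROOFS =====

-- B's closed-form entry, named for the proofs
def pvF (i : Int) : Int :=
  1 + PySem.Int.floordiv (PySem.Int.floordiv (i + 1) 2 * (PySem.Int.floordiv (i + 1) 2 + 1)) 2
    + PySem.Int.floordiv i 2 * (PySem.Int.floordiv i 2 + 2)

-- A's loop body, named for the proofs
def pvStep (l : List Int) (i : Int) : List Int :=
  if PySem.Int.mod i 2 ≠ 0 then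
    l ++ [(PySem.List.pyGet? l (i - 1)).getD 0 + PySem.Int.floordiv (i + 1) 2]
  else
    l ++ [(PySem.List.pyGet? l (i - 1)).getD 0 + i + 1]

lemma pvF_odd (k : Int) :
    pvF (2 * k + 1) = pvF (2 * k) + PySem.Int.floordiv (2 * k + 1 + 1) 2 := by
  obtain ⟨t, ht⟩ := Int.even_mul_succ_self k
  have h1 : k * (k + 1) = 2 * t := by omega
  simp only [pvF, PySem.Int.floordiv_eq_ediv_of_pos (by norm_num : (0:Int) < 2)]
  have e1 : (2 * k + 1 + 1) / 2 = k + 1 := by omega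
  have e2 : (2 * k + 1) / 2 = k := by omega
  have e3 : (2 * k) / 2 = k := by omega
  rw [e1, e2, e3]
  have h2 : (k + 1) * (k + 1 + 1) = 2 * (t + k + 1) := by
    calc (k + 1) * (k + 1 + 1) = k * (k + 1) + 2 * (k + 1) := by ring
    _ = 2 * t + 2 * (k + 1) := by rw [h1]
    _ = 2 * (t + k + 1) := by ring
  rw [h1, h2, Int.mul_ediv_cancel_left _ (by norm_num : (2:Int) ≠ 0),
      Int.mul_ediv_cancel_left _ (by norm_num : (2:Int) ≠ 0)]
  ring

lemma pvF_even (k : Int) :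
    pvF (2 * k + 1 + 1) = pvF (2 * k + 1) + (2 * k + 1 + 1 + 1) := by
  simp only [pvF, PySem.Int.floordiv_eq_ediv_of_pos (by norm_num : (0:Int) < 2)]
  have e1 : (2 * k + 1 + 1 + 1) / 2 = k + 1 := by omega
  have e2 : (2 * k + 1 + 1) / 2 = k + 1 := by omega
  have e4 : (2 * k + 1) / 2 = k := by omega
  rw [e1, e2, e4]
  ring

lemma pvF_succ (m : Nat) :
    pvF ((m : Int) + 1) =
      pvF m + (if PySem.Int.mod ((m : Int) + 1) 2 ≠ 0
               then PySem.Int.floordiv ((m : Int) + 1 + 1) 2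
               else (m : Int) + 1 + 1) := by
  have hmod : ∀ a : Int, PySem.Int.mod a 2 = a % 2 :=
    fun a => PySem.Int.mod_eq_emod_of_pos (by norm_num)
  rcases Int.even_or_odd (m : Int) with ⟨k, hk⟩ | ⟨k, hk⟩
  · have hm : (m : Int) = 2 * k := by omega
    rw [hm, if_pos (by rw [hmod]; omega)]
    exact pvF_odd k
  · have hm : (m : Int) = 2 * k + 1 := by omega
    rw [hm, if_neg (by rw [hmod]; omega)]
    exact pvF_even k

lemma pvF_zero : pvF 0 = 1 := by decide

-- the loop invariant: after processing range(1, m+1), A's list is the map of the closed form over range(0, m+1)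
lemma pvLoop (m : Nat) :
    (PySem.List.pyRange 1 ((m : Int) + 1) 1).foldl pvStep [1] =
      (PySem.List.pyRange 0 ((m : Int) + 1) 1).map pvF := by
  induction m with
  | zero => decide
  | succ m ih =>
    rw [show (((m + 1 : Nat) : Int) + 1) = ((m : Int) + 1) + 1 by push_cast [Nat.cast_add]; ring]
    rw [PySem.List.pyRange_one_succ_right (a := 1) (by omega),
        PySem.List.pyRange_one_succ_right (a := 0) (by omega)]
    rw [List.foldl_append, ih, List.map_append]
    simp only [List.foldl_cons, List.foldl_nil, List.map_cons, List.map_nil]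
    -- one step: pvStep L (m+1) = L ++ [pvF (m+1)]
    unfold pvStep
    have hidx : ((m : Int) + 1 - 1) = (m : Int) := by ring
    have hget : PySem.List.pyGet? ((PySem.List.pyRange 0 ((m : Int) + 1) 1).map pvF) (m : Int)
        = some (pvF m) := by
      rw [PySem.List.pyGet?_natCast]
      have := PySem.List.getElem?_map_pyRange_zero pvF (m + 1) m (by omega)
      rw [show ((m : Int) + 1) = ((m + 1 : Nat) : Int) by push_cast [Nat.cast_add]; ring]
      exact this
    rw [hidx, hget]
    rw [pvF_succ m]
    split_ifs with h
    · simp [add_assoc]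
    · simp [add_assoc]

lemma ypat2_eq_fold (n : Int) :
    ypat2 n = (PySem.List.pyRange 1 (n + 1) 1).foldl pvStep [1] := rfl

lemma ypat2_alt_eq_map (n : Int) :
    ypat2_alt n = 1 :: (PySem.List.pyRange 1 (n + 1) 1).map pvF := rfl

-- ===== VERDICT (by name: the statement is the Claim_ definition above) =====
theorem ypat2_spec : Claim_equal_ypat2 := by
  intro n _
  unfold Spec_ypat2
  rw [ypat2_eq_fold, ypat2_alt_eq_map]
  rcases le_or_gt n 0 with hn | hn
  · rw [PySem.List.pyRange_one_eq_nil (by omega)]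
    simp
  · obtain ⟨m, hm⟩ : ∃ m : Nat, n = (m : Int) := ⟨n.toNat, by omega⟩
    subst hm
    rw [pvLoop m]
    rw [PySem.List.pyRange_one_cons (a := 0) (by omega)]
    simp [pvF_zero]
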